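-- pv_equiv track=rewrite | github.com/glk1001/barks-ocr | src/barks_ocr/tools/censorship_table.py | split_rows_into_pages
-- ===== SOURCE A (Python) =====
-- def split_rows_into_pages(pg_size: int, rows: list, first_page_reduction: int = 0) -> dict:
--     pages = {}
--     page_num = 1
--     row_list = []
--     row_count = 0
--     current_pg_size = pg_size - first_page_reduction
--     prev_non_empty_cols = list(rows[0])
--     for index, row in enumerate(rows):
--         if row_count == 0:
--             for i, col in enumerate(row):
--                 if col == '"':
--                     row[i] = prev_non_empty_cols[i]
--
--         row_list.append(row)
--         row_count += 1
--
--         prev_non_empty_cols = [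
--             col if col != '"' else prev_non_empty_col
--             for col, prev_non_empty_col in zip(row, prev_non_empty_cols, strict=True)
--         ]
--
--         if (row_count == current_pg_size) or (index + 1 == len(rows)):
--             pages[page_num] = row_list
--             row_list = []
--             row_count = 0
--             page_num += 1
--             current_pg_size = pg_size  # remaining pages use full size
--
--     return pages
-- ===== SOURCE B (Python) =====
-- def split_rows_into_pages(pg_size: int, rows: list, first_page_reduction: int = 0) -> dict:
--     # Pass 1: forward-fill states; prev_states[i] is the carry state just before row i.
--     prev_states = []
--     prev = list(rows[0])
--     for row in rows:
--         prev_states.append(prev)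
--         prev = [c if c != '"' else p for c, p in zip(row, prev)]
--     # Pass 2: chunk the rows into pages, filling quote cells in each page's first row.
--     pages = {}
--     page_num = 1
--     remaining = list(rows)
--     remaining_prevs = prev_states
--     size = pg_size - first_page_reduction
--     while remaining:
--         k = size if 0 < size <= len(remaining) else len(remaining)
--         chunk, remaining = remaining[:k], remaining[k:]
--         head_prev, remaining_prevs = remaining_prevs[0], remaining_prevs[k:]
--         chunk[0] = [c if c != '"' else p for c, p in zip(chunk[0], head_prev)]
--         pages[page_num] = chunk
--         page_num += 1
--         size = pg_size
--     return pages
-- ===== Notes on version B (the rewrite author's own statement) =====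
-- stated objective: alternative
-- what changed: Replaces A's single stateful loop (page/row counters, in-place mutation of each page's first row) by two passes: precompute the forward-fill carry state before every row, then split the rows into page chunks by list slicing, filling quote cells only in each chunk's fresh first row; B does not mutate the input rows (return values are identical).
import Mathlib
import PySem

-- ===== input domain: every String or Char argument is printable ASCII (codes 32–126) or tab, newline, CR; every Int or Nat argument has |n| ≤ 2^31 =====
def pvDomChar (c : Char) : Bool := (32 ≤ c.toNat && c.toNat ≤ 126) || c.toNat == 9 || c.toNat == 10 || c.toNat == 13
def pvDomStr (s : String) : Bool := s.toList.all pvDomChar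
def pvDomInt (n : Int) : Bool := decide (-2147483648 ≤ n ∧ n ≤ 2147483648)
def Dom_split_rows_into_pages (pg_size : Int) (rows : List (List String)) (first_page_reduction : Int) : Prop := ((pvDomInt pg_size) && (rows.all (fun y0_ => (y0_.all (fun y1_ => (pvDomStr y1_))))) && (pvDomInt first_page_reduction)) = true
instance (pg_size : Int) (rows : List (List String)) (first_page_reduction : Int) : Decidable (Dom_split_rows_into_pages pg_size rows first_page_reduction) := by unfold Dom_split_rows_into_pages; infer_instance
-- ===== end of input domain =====

-- B replaces A's single stateful counter loop by two passes (precomputed forward-fill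
-- carry states, then slicing the rows into page chunks); equal RETURN value only: A
-- mutates the first row of each page in place, B leaves the input rows untouched.

-- ===== PORT A =====
-- '"'-cell fill: both the in-place mutation loop (exact when row/prev have equal
-- length, guaranteed by Pre_) and the prev_non_empty_cols comprehension compute this.
def pvFill (row prev : List String) : List String :=
  (row.zip prev).map (fun cp => if cp.1 ≠ "\"" then cp.1 else cp.2)

-- the body of A's for-loop, over state (pages, page_num, row_list, row_count, current_pg_size, prev)
def pvStepA (pg n : Int)
    (st : List (Int × List (List String)) × Int × List (List String) × Int × Int × List String)
    (ir : Int × List String) :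
    List (Int × List (List String)) × Int × List (List String) × Int × Int × List String :=
  let pages := st.1
  let page_num := st.2.1
  let row_list := st.2.2.1
  let row_count := st.2.2.2.1
  let current_pg_size := st.2.2.2.2.1
  let prev := st.2.2.2.2.2
  let row := if row_count = 0 then pvFill ir.2 prev else ir.2
  let row_list := row_list ++ [row]
  let row_count := row_count + 1
  let prev := pvFill row prev
  if row_count = current_pg_size ∨ ir.1 + 1 = n then
    (pages ++ [(page_num, row_list)], page_num + 1, [], 0, pg, prev)
  else
    (pages, page_num, row_list, row_count, current_pg_size, prev)

-- rows[0] raises IndexError on empty rows (excluded by Pre_); headD is a placeholder there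
def split_rows_into_pages (pg_size : Int) (rows : List (List String)) (first_page_reduction : Int) : List (Int × List (List String)) :=
  let n : Int := rows.length
  ((PySem.List.enumerate rows).foldl (pvStepA pg_size n)
    ([], 1, [], 0, pg_size - first_page_reduction, rows.headD [])).1

-- ===== PORT B =====
-- pass 1 of Source B: prev_states; pvPrevStates l p = the list of carry states before each row of l
def pvPrevStates (rows : List (List String)) (prev : List String) : List (List String) :=
  match rows with
  | [] => []
  | r :: rs => prev :: pvPrevStates rs (pvFill r prev)

-- pass 2 of Source B: the while loop over (remaining, remaining_prevs, size, page_num)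
def pvAltGo (pg : Int) (remaining : List (List String)) (prevs : List (List String)) (size : Int) (pn : Int) : List (Int × List (List String)) :=
  match remaining with
  | [] => []
  | r :: rs =>
    let len : Int := (r :: rs).length
    let k : Nat := if 0 < size ∧ size ≤ len then size.toNat else (r :: rs).length
    let chunk := (r :: rs).take k
    let rem := (r :: rs).drop k
    let headPrev := prevs.headD []   -- remaining_prevs[0]; nonempty whenever prevs mirrors remaining
    let chunk' := match chunk with | [] => [] | c :: cs => pvFill c headPrev :: cs
    (pn, chunk') :: pvAltGo pg rem (prevs.drop k) pg (pn + 1)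
  termination_by remaining.length
  decreasing_by
    simp only [List.length_drop, List.length_cons]
    split_ifs with h
    · obtain ⟨h1, -⟩ := h; omega
    · omega

def split_rows_into_pages_alt (pg_size : Int) (rows : List (List String)) (first_page_reduction : Int) : List (Int × List (List String)) :=
  let prev_states := pvPrevStates rows (rows.headD [])   -- rows[0] raises on empty rows (excluded by Pre_)
  pvAltGo pg_size rows prev_states (pg_size - first_page_reduction) 1

-- ===== PRECONDITION & SPEC =====
-- A raises IndexError on rows = [] (rows[0]) and ValueError on ragged rows (zip(..., strict=True)).
def Pre_split_rows_into_pages (pg_size : Int) (rows : List (List String)) (first_page_reduction : Int) : Prop :=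
  rows ≠ [] ∧ ∀ r ∈ rows, r.length = (rows.headD []).length
instance (pg_size : Int) (rows : List (List String)) (first_page_reduction : Int) : Decidable (Pre_split_rows_into_pages pg_size rows first_page_reduction) := by unfold Pre_split_rows_into_pages; infer_instance

def pvWitness_split_rows_into_pages : Int × List (List String) × Int :=
  (2, [["a", "\""], ["\"", "b"], ["c", "d"]], 1)

def Spec_split_rows_into_pages (pg_size : Int) (rows : List (List String)) (first_page_reduction : Int) (out : List (Int × List (List String))) : Prop := out = split_rows_into_pages_alt pg_size rows first_page_reduction
instance (pg_size : Int) (rows : List (List String)) (first_page_reduction : Int) (out : List (Int × List (List String))) : Decidable (Spec_split_rows_into_pages pg_size rows first_page_reduction out) := by unfold Spec_split_rows_into_pages; infer_instance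

-- ===== CLAIM (what is proved, stated in full; the proofs are below) =====
def Claim_equal_split_rows_into_pages : Prop := ∀ (pg_size : Int) (rows : List (List String)) (first_page_reduction : Int), Dom_split_rows_into_pages pg_size rows first_page_reduction → Pre_split_rows_into_pages pg_size rows first_page_reduction → Spec_split_rows_into_pages pg_size rows first_page_reduction (split_rows_into_pages pg_size rows first_page_reduction)

-- ===== LEMMAS AND PROOFS =====

-- A's loop as structural recursion on the remaining rows (proof-side view of the foldl)
def pvALoop (pg n idx : Int) (rest : List (List String))
    (st : List (Int × List (List String)) × Int × List (List String) × Int × Int × List String) :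
    List (Int × List (List String)) × Int × List (List String) × Int × Int × List String :=
  match rest with
  | [] => st
  | row :: rs => pvALoop pg n (idx + 1) rs (pvStepA pg n st (idx, row))

lemma foldl_enum_aloop (pg n : Int) (rest : List (List String)) : ∀ (idx : Int)
    (st : List (Int × List (List String)) × Int × List (List String) × Int × Int × List String),
    (PySem.List.enumerate rest idx).foldl (pvStepA pg n) st = pvALoop pg n idx rest st := by
  induction rest with
  | nil => intro idx st; simp [PySem.List.enumerate_nil, pvALoop]
  | cons r rs ih =>
    intro idx st
    rw [PySem.List.enumerate_cons, List.foldl_cons, pvALoop, ih]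

lemma pvFill_pvFill (r : List String) : ∀ (p : List String), pvFill (pvFill r p) p = pvFill r p := by
  induction r with
  | nil => intro p; simp [pvFill]
  | cons a as ih =>
    intro p
    cases p with
    | nil => simp [pvFill]
    | cons b bs =>
      have ht := ih bs
      simp only [pvFill, List.zip_cons_cons, List.map_cons] at ht ⊢
      rw [ht]
      by_cases h : a = "\"" <;> by_cases h2 : b = "\"" <;> simp [h, h2]

-- the carry of pass 1 over a prefix
def pvChain (l : List (List String)) (p : List String) : List String :=
  l.foldl (fun p r => pvFill r p) p

lemma pvChain_cons (r : List String) (l : List (List String)) (p : List String) :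
    pvChain (r :: l) p = pvChain l (pvFill r p) := rfl

lemma pvPrevStates_drop (l : List (List String)) : ∀ (k : Nat) (p : List String),
    (pvPrevStates l p).drop k = pvPrevStates (l.drop k) (pvChain (l.take k) p) := by
  induction l with
  | nil => intro k p; simp [pvPrevStates]
  | cons r rs ih =>
    intro k p
    cases k with
    | zero => simp [pvChain]
    | succ k => simpa [pvPrevStates, pvChain_cons] using ih k (pvFill r p)

-- A's continuation from the middle of a page: the current page closes after
-- sz = current_pg_size - row_count more rows (or at the end of the list)
def pvInner (pg : Int) (rest : List (List String)) (pn : Int) (rl : List (List String)) (sz : Int) (prev : List String) : List (Int × List (List String)) :=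
  match rest with
  | [] => []
  | r :: rs =>
    let m : Nat := if 0 < sz ∧ sz ≤ ((rs.length : Int) + 1) then sz.toNat else rs.length + 1
    (pn, rl ++ (r :: rs).take m)
      :: pvAltGo pg ((r :: rs).drop m) (pvPrevStates ((r :: rs).drop m) (pvChain ((r :: rs).take m) prev)) pg (pn + 1)

-- the main invariant: A's loop at a page boundary computes B's chunking, and
-- mid-page it computes pvInner
lemma pv_both (pg n : Int) : ∀ (fuel : Nat) (rest : List (List String)), rest.length ≤ fuel →
    (∀ (idx : Int) (pages : List (Int × List (List String))) (pn cps : Int) (prev : List String),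
      idx + rest.length = n →
      (pvALoop pg n idx rest (pages, pn, [], 0, cps, prev)).1
        = pages ++ pvAltGo pg rest (pvPrevStates rest prev) cps pn) ∧
    (∀ (idx : Int) (pages : List (Int × List (List String))) (pn : Int) (rl : List (List String)) (rc cps : Int) (prev : List String),
      idx + rest.length = n → 1 ≤ rc → (rc < cps ∨ cps ≤ 0) → rest ≠ [] →
      (pvALoop pg n idx rest (pages, pn, rl, rc, cps, prev)).1
        = pages ++ pvInner pg rest pn rl (cps - rc) prev) := by
  intro fuel
  induction fuel with
  | zero =>
    intro rest hlen
    have : rest = [] := List.eq_nil_of_length_eq_zero (Nat.le_zero.mp hlen)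
    subst this
    constructor
    · intro idx pages pn cps prev _; simp [pvALoop, pvAltGo]
    · intro idx pages pn rl rc cps prev _ _ _ hne; exact absurd rfl hne
  | succ fuel ih =>
    intro rest hlen
    cases rest with
    | nil =>
      constructor
      · intro idx pages pn cps prev _; simp [pvALoop, pvAltGo]
      · intro idx pages pn rl rc cps prev _ _ _ hne; exact absurd rfl hne
    | cons r rs =>
      have hrs : rs.length ≤ fuel := by simpa using hlen
      constructor
      · -- page start: row_count = 0, row_list = []
        intro idx pages pn cps prev hn
        rw [pvALoop]
        have hstep : pvStepA pg n (pages, pn, [], 0, cps, prev) (idx, r)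
            = if 1 = cps ∨ idx + 1 = n then
                (pages ++ [(pn, [pvFill r prev])], pn + 1, [], 0, pg, pvFill r prev)
              else (pages, pn, [pvFill r prev], 1, cps, pvFill r prev) := by
          simp [pvStepA, pvFill_pvFill]
        by_cases hcl : 1 = cps ∨ idx + 1 = n
        · rw [hstep, if_pos hcl, (ih rs hrs).1 (idx + 1) _ (pn + 1) pg (pvFill r prev)
            (by simp at hn ⊢; omega)]
          have hk : (if 0 < cps ∧ cps ≤ (((r :: rs).length : Int)) then cps.toNat else (r :: rs).length) = 1 := by
            have hor : cps = 1 ∨ rs.length = 0 := by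
              rcases hcl with h | h
              · exact Or.inl h.symm
              · right; simp at hn; omega
            split_ifs with h
            · rcases hor with h1 | h1
              · simp [h1]
              · simp [h1] at h; omega
            · rcases hor with h1 | h1
              · exfalso; apply h; constructor <;> simp [h1] <;> omega
              · simp [h1]
          rw [pvAltGo]
          simp only [hk, List.take_succ_cons, List.take_zero, List.drop_succ_cons, List.drop_zero,
            List.drop_one, pvPrevStates, List.headD_cons, List.tail_cons, List.append_assoc,
            List.singleton_append]
        · rw [hstep, if_neg hcl]
          push_neg at hcl
          obtain ⟨hc1, hc2⟩ := hcl
          have hrsne : rs ≠ [] := by intro h; subst h; simp at hn; omega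
          rw [(ih rs hrs).2 (idx + 1) pages pn [pvFill r prev] 1 cps (pvFill r prev)
            (by simp at hn ⊢; omega) le_rfl (by omega) hrsne]
          cases rs with
          | nil => exact absurd rfl hrsne
          | cons c cs =>
            rw [pvAltGo, pvInner]
            have hk : (if 0 < cps ∧ cps ≤ (((r :: c :: cs).length : Int)) then cps.toNat else (r :: c :: cs).length)
                = (if 0 < cps - 1 ∧ cps - 1 ≤ ((cs.length : Int) + 1) then (cps - 1).toNat else cs.length + 1) + 1 := by
              simp only [List.length_cons]
              split_ifs with h h2 h2 <;> push_cast at h h2 ⊢ <;> omega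
            simp only [hk, List.take_succ_cons, List.drop_succ_cons, pvPrevStates,
              List.headD_cons, List.drop_succ_cons, pvChain_cons, pvPrevStates_drop,
              List.singleton_append, List.cons_append, List.nil_append]
            rw [show pvFill r prev :: pvPrevStates cs (pvFill c (pvFill r prev))
                = pvPrevStates (c :: cs) (pvFill r prev) from rfl, pvPrevStates_drop]
      · -- mid-page: row_count = rc ≥ 1
        intro idx pages pn rl rc cps prev hn hrc hinv _
        rw [pvALoop]
        have hstep : pvStepA pg n (pages, pn, rl, rc, cps, prev) (idx, r)
            = if rc + 1 = cps ∨ idx + 1 = n then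
                (pages ++ [(pn, rl ++ [r])], pn + 1, [], 0, pg, pvFill r prev)
              else (pages, pn, rl ++ [r], rc + 1, cps, pvFill r prev) := by
          have : ¬ rc = 0 := by omega
          simp [pvStepA, this]
        by_cases hcl : rc + 1 = cps ∨ idx + 1 = n
        · rw [hstep, if_pos hcl, (ih rs hrs).1 (idx + 1) _ (pn + 1) pg (pvFill r prev)
            (by simp at hn ⊢; omega)]
          rw [pvInner]
          have hm : (if 0 < cps - rc ∧ cps - rc ≤ ((rs.length : Int) + 1) then (cps - rc).toNat else rs.length + 1) = 1 := by
            rcases hcl with h | h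
            · have : cps - rc = 1 := by omega
              simp [this]
            · have h1 : rs.length = 0 := by simp at hn; omega
              split_ifs with h2
              · simp [h1] at h2; omega
              · simp [h1]
          simp only [hm, List.take_succ_cons, List.take_zero, List.drop_succ_cons, List.drop_zero]
          have hchain : pvChain [r] prev = pvFill r prev := rfl
          rw [hchain]
          simp
        · rw [hstep, if_neg hcl]
          push_neg at hcl
          obtain ⟨hc1, hc2⟩ := hcl
          have hrsne : rs ≠ [] := by intro h; subst h; simp at hn; omega
          rw [(ih rs hrs).2 (idx + 1) pages pn (rl ++ [r]) (rc + 1) cps (pvFill r prev)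
            (by simp at hn ⊢; omega) (by omega) (by omega) hrsne]
          cases rs with
          | nil => exact absurd rfl hrsne
          | cons c cs =>
            rw [pvInner, pvInner]
            have hm : (if 0 < cps - rc ∧ cps - rc ≤ (((c :: cs).length : Int) + 1) then (cps - rc).toNat else (c :: cs).length + 1)
                = (if 0 < cps - (rc + 1) ∧ cps - (rc + 1) ≤ ((cs.length : Int) + 1) then (cps - (rc + 1)).toNat else cs.length + 1) + 1 := by
              simp only [List.length_cons]
              split_ifs with h h2 h2 <;> push_cast at h h2 ⊢ <;> omega
            simp only [hm, List.take_succ_cons, List.drop_succ_cons, pvChain_cons,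
              List.append_assoc, List.cons_append, List.singleton_append, List.nil_append]

-- ===== VERDICT (by name: the statement is the Claim_ definition above) =====
theorem split_rows_into_pages_spec : Claim_equal_split_rows_into_pages := by
  intro pg rows fr _ _
  unfold Spec_split_rows_into_pages split_rows_into_pages split_rows_into_pages_alt
  show (List.foldl (pvStepA pg (rows.length : Int)) ([], 1, [], 0, pg - fr, rows.headD [])
      (PySem.List.enumerate rows)).1
    = pvAltGo pg rows (pvPrevStates rows (rows.headD [])) (pg - fr) 1
  rw [foldl_enum_aloop,
    (pv_both pg rows.length rows.length rows le_rfl).1 0 [] 1 (pg - fr) (rows.headD []) (by simp)]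
  simp
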